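-- pv_equiv track=rewrite | github.com/roylleh/Google-Foobar | bin/level5/Nebula.py | answer
-- ===== SOURCE A (Python) =====
-- combinations = [(0, 0), (0, 1), (1, 0), (1, 1)]
--
-- possibilities = {}
--
-- def buildGrid2(firstState, row):
--     grid2 = []
--     for key in firstState:
--         prevState = []
--         for combination in combinations:
--             if possibilities[((key[0], key[1]), combination)] == row[0]:
--                 prevState.append(combination)
--
--         for i in range(1, len(row)):
--             nextState = []
--             for state in prevState:
--                 for j in range(2):
--                     if possibilities[((key[i], key[i + 1]), (state[i], j))] == row[i]:
--                         temp = list(state)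
--                         temp.append(j)
--                         nextState.append(temp)
--
--             prevState = nextState
--
--         for state in prevState:
--             grid2.append((key, tuple(state)))
--
--     return grid2
--
-- def buildGrid1(row):
--     prevState = []
--     currState = row[0]
--     for key, val in possibilities.items():
--         if currState == val:
--             prevState.append(key)
--
--     for i in range(1, len(row)):
--         nextState = []
--         for state in prevState:
--             for combination in combinations:
--                 if possibilities[(state[i], combination)] == row[i]:
--                     temp = list(state)
--                     temp.append(combination)
--                     nextState.append(temp)
--
--         prevState = nextState
--
--     return [tuple(zip(*state)) for state in prevState]
--
-- def answer(g):
--     for i in range(2):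
--         for j in range(2):
--             for k in range(2):
--                 for l in range(2):
--                     possibilities[((i, j), (k, l))] = i & ~j & ~k & ~l | ~i & j & ~k & ~l | ~i & ~j & k & ~l | ~i & ~j & ~k & l
--
--     transpose = tuple(zip(*g))
--     grid1 = buildGrid1(transpose[0])
--     firstState = {}
--     for row in grid1:
--         key = row[1]
--         if key in firstState:
--             firstState[key] += 1
--         else:
--             firstState[key] = 1
--
--     for i in range(1, len(transpose)):
--         secondState = {}
--         grid2 = buildGrid2(firstState, transpose[i])
--         for row in grid2:
--             key1 = row[0]
--             key2 = row[1]
--             if key1 in firstState: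
--                 if key2 in secondState:
--                     secondState[key2] += firstState[key1]
--                 else:
--                     secondState[key2] = firstState[key1]
--
--         firstState = secondState
--
--     result = 0
--     for key, value in firstState.items():
--         result += value
--
--     return result
-- ===== SOURCE B (Python) =====
-- # Depth-first accumulation: per predecessor column, compatible next columns are
-- # enumerated recursively and merged straight into a counter -- no materialized
-- # state levels, no pair lists, no lookup table (the 2x2 rule is arithmetic).
-- def answer(g):
--     combos = ((0, 0), (0, 1), (1, 0), (1, 1))
--
--     def one(a, b, c, d):
--         return 1 if a + b + c + d == 1 else 0
--
--     cols = list(zip(*g))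
--     col0 = cols[0]
--
--     counts = {}
--
--     def go1(x, y, rest, ys):
--         # (x, y): current (left-grid, right-grid) cell pair; rest: remaining
--         # cells of the target column; ys: right column built so far.
--         if not rest:
--             counts[ys] = counts.get(ys, 0) + 1
--             return
--         for (p, q) in combos:
--             if one(x, y, p, q) == rest[0]:
--                 go1(p, q, rest[1:], ys + (q,))
--
--     for (x, y) in combos:
--         go1(x, y, col0, (y,))
--
--     for col in cols[1:]:
--         new = {}
--
--         def go2(c1s, y, rest, ys, v):
--             if not rest:
--                 new[ys] = new.get(ys, 0) + v
--                 return
--             for q in (0, 1):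
--                 if one(c1s[0], c1s[1], y, q) == rest[0]:
--                     go2(c1s[1:], q, rest[1:], ys + (q,), v)
--
--         for c1, v in counts.items():
--             for (y0, y1) in combos:
--                 if one(c1[0], c1[1], y0, y1) == col[0]:
--                     go2(c1[1:], y1, col[1:], (y0, y1), v)
--
--         counts = new
--
--     return sum(counts.values())
-- ===== Notes on version B (the rewrite author's own statement) =====
-- stated objective: alternative
-- what changed: Replaces A's precomputed 16-entry rule table and breadth-first level lists (which materialize every partial predecessor state in a growing list and then aggregate a full grid of (column,column) pairs into a dict) with a depth-first recursion per target column that tests the 2x2 rule arithmetically and merges each completed predecessor column straight into the counter.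
import Mathlib
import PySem

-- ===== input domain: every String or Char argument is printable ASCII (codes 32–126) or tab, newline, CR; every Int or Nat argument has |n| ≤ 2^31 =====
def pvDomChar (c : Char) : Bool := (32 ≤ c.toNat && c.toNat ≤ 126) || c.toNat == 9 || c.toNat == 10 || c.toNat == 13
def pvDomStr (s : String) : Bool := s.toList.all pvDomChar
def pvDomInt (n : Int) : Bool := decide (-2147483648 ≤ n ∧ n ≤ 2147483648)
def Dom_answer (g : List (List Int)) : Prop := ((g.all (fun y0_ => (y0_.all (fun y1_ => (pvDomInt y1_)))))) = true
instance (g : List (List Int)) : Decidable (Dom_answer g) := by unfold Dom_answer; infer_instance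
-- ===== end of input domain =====

-- B replaces A's rule table and breadth-first state-level lists by a depth-first
-- recursion per target column that merges finished predecessor columns straight into
-- the counter (same return value; A mutates a module-level dict, B does not).

-- ===== PORT A =====
def pvCombinations : List (Int × Int) := [(0, 0), (0, 1), (1, 0), (1, 1)]

-- possibilities[((i,j),(k,l))] = i&~j&~k&~l | ~i&j&~k&~l | ~i&~j&k&~l | ~i&~j&~k&l
def pvPoss : PySem.Dict ((Int × Int) × (Int × Int)) Int :=
  (PySem.List.pyRange 0 2 1).foldl (fun d i =>
    (PySem.List.pyRange 0 2 1).foldl (fun d j =>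
      (PySem.List.pyRange 0 2 1).foldl (fun d k =>
        (PySem.List.pyRange 0 2 1).foldl (fun d l =>
          d.insert ((i, j), (k, l))
            (PySem.Int.bor (PySem.Int.bor (PySem.Int.bor
              (PySem.Int.band (PySem.Int.band (PySem.Int.band i (Int.not j)) (Int.not k)) (Int.not l))
              (PySem.Int.band (PySem.Int.band (PySem.Int.band (Int.not i) j) (Int.not k)) (Int.not l)))
              (PySem.Int.band (PySem.Int.band (PySem.Int.band (Int.not i) (Int.not j)) k) (Int.not l)))
              (PySem.Int.band (PySem.Int.band (PySem.Int.band (Int.not i) (Int.not j)) (Int.not k)) l)))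
          d) d) d) PySem.Dict.empty

-- exact model of Python's zip(*g): length = shortest row, entry t = t-th cell of each row
def pvTranspose (g : List (List Int)) : List (List Int) :=
  match g with
  | [] => []
  | r0 :: rest =>
    let m := rest.foldl (fun acc r => min acc r.length) r0.length
    (List.range m).map (fun t => (r0 :: rest).map (fun r => r.getD t 0))

def pvBuildGrid1 (row : List Int) : List (List Int × List Int) :=
  let prevState : List (List (Int × Int)) :=
    pvPoss.items.foldl (fun acc kv =>
      if PySem.List.pyGetD row 0 0 == kv.2 then acc ++ [[kv.1.1, kv.1.2]] else acc) []
  let prevState :=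
    (PySem.List.pyRange 1 (PySem.List.len row) 1).foldl (fun prev i =>
      prev.foldl (fun next state =>
        pvCombinations.foldl (fun next comb =>
          if pvPoss.getD (PySem.List.pyGetD state i (0, 0), comb) 0 == PySem.List.pyGetD row i 0
          then next ++ [state ++ [comb]] else next) next) []) prevState
  prevState.map (fun state => (state.map Prod.fst, state.map Prod.snd))

def pvBuildGrid2 (firstState : PySem.Dict (List Int) Int) (row : List Int) :
    List (List Int × List Int) :=
  firstState.keys.foldl (fun grid2 key =>
    let prevState : List (List Int) :=
      pvCombinations.foldl (fun acc comb =>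
        if pvPoss.getD ((PySem.List.pyGetD key 0 0, PySem.List.pyGetD key 1 0), comb) 0
             == PySem.List.pyGetD row 0 0
        then acc ++ [[comb.1, comb.2]] else acc) []
    let prevState :=
      (PySem.List.pyRange 1 (PySem.List.len row) 1).foldl (fun prev i =>
        prev.foldl (fun next state =>
          (PySem.List.pyRange 0 2 1).foldl (fun next j =>
            if pvPoss.getD ((PySem.List.pyGetD key i 0, PySem.List.pyGetD key (i + 1) 0),
                            (PySem.List.pyGetD state i 0, j)) 0 == PySem.List.pyGetD row i 0
            then next ++ [state ++ [j]] else next) next) []) prevState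
    prevState.foldl (fun grid2 state => grid2 ++ [(key, state)]) grid2) []

def answer (g : List (List Int)) : Int :=
  let transpose := pvTranspose g
  let grid1 := pvBuildGrid1 (PySem.List.pyGetD transpose 0 [])
  let firstState : PySem.Dict (List Int) Int :=
    grid1.foldl (fun fs r =>
      let key := r.2
      if fs.contains key then fs.insert key (fs.getD key 0 + 1) else fs.insert key 1)
      PySem.Dict.empty
  let firstState :=
    (PySem.List.pyRange 1 (PySem.List.len transpose) 1).foldl (fun fs i =>
      let grid2 := pvBuildGrid2 fs (PySem.List.pyGetD transpose i [])
      grid2.foldl (fun ss r =>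
        if fs.contains r.1 then
          (if ss.contains r.2 then ss.insert r.2 (ss.getD r.2 0 + fs.getD r.1 0)
           else ss.insert r.2 (fs.getD r.1 0))
        else ss) PySem.Dict.empty) firstState
  firstState.items.foldl (fun acc kv => acc + kv.2) 0

-- ===== PORT B =====
def pvZeroOne : List Int := [0, 1]

def pvOne (a b c d : Int) : Int := if a + b + c + d == 1 then 1 else 0

def pvGo1 (x y : Int) (rest : List Int) (ys : List Int)
    (counts : PySem.Dict (List Int) Int) : PySem.Dict (List Int) Int :=
  match rest with
  | [] => counts.insert ys (counts.getD ys 0 + 1)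
  | c :: rest' =>
    pvCombinations.foldl (fun counts pq =>
      if pvOne x y pq.1 pq.2 == c then pvGo1 pq.1 pq.2 rest' (ys ++ [pq.2]) counts else counts)
      counts
termination_by rest.length
decreasing_by simp

def pvGo2 (c1s : List Int) (y : Int) (rest : List Int) (ys : List Int) (v : Int)
    (new : PySem.Dict (List Int) Int) : PySem.Dict (List Int) Int :=
  match rest with
  | [] => new.insert ys (new.getD ys 0 + v)
  | c :: rest' =>
    pvZeroOne.foldl (fun new q =>
      if pvOne (PySem.List.pyGetD c1s 0 0) (PySem.List.pyGetD c1s 1 0) y q == c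
      then pvGo2 (PySem.List.slice c1s (some 1) none) q rest' (ys ++ [q]) v new else new) new
termination_by rest.length
decreasing_by simp

def answer_alt (g : List (List Int)) : Int :=
  let cols := pvTranspose g
  let col0 := PySem.List.pyGetD cols 0 []
  let counts : PySem.Dict (List Int) Int :=
    pvCombinations.foldl (fun cnt xy => pvGo1 xy.1 xy.2 col0 [xy.2] cnt) PySem.Dict.empty
  let counts :=
    (PySem.List.slice cols (some 1) none).foldl (fun counts col =>
      counts.items.foldl (fun new kv =>
        pvCombinations.foldl (fun new y01 =>
          if pvOne (PySem.List.pyGetD kv.1 0 0) (PySem.List.pyGetD kv.1 1 0) y01.1 y01.2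
               == PySem.List.pyGetD col 0 0
          then pvGo2 (PySem.List.slice kv.1 (some 1) none) y01.2
                 (PySem.List.slice col (some 1) none) [y01.1, y01.2] kv.2 new
          else new) new) PySem.Dict.empty) counts
  counts.values.sum

-- ===== PRECONDITION & SPEC =====
-- Pre_ excludes exactly the inputs where A raises (IndexError on transpose[0]):
-- the empty grid and grids with an empty row, i.e. where zip(*g) is empty.
def Pre_answer (g : List (List Int)) : Prop := g ≠ [] ∧ ∀ r ∈ g, r ≠ []
instance (g : List (List Int)) : Decidable (Pre_answer g) := by unfold Pre_answer; infer_instance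
def pvWitness_answer : List (List Int) := [[1, 0], [0, 1]]

def Spec_answer (g : List (List Int)) (out : Int) : Prop := out = answer_alt g
instance (g : List (List Int)) (out : Int) : Decidable (Spec_answer g out) := by
  unfold Spec_answer; infer_instance

-- ===== CLAIM (what is proved, stated in full; the proofs are below) =====
def Claim_equal_answer : Prop :=
  ∀ (g : List (List Int)), Dom_answer g → Pre_answer g → Spec_answer g (answer g)

-- ===== LEMMAS AND PROOFS =====

-- increment of a counter dict: A's contains-branch equals a plain insert-with-getD
theorem pvInc_norm {d : PySem.Dict (List Int) Int} {k : List Int} {v : Int} :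
    (if d.contains k then d.insert k (d.getD k 0 + v) else d.insert k v)
      = d.insert k (d.getD k 0 + v) := by
  cases h : d.contains k with
  | true => simp
  | false => rw [PySem.Dict.getD_of_not_contains (h := h)]; simp

-- a fold of folds is a fold over the flatMap
theorem pvFoldl_fold_flatMap {α β γ : Type} (l : List α) (K : α → List β)
    (f : γ → β → γ) (z : γ) :
    l.foldl (fun acc x => (K x).foldl f acc) z = (l.flatMap K).foldl f z := by
  induction l generalizing z with
  | nil => rfl
  | cons a t ih => simp [List.flatMap_cons, List.foldl_append, ih]

-- a fold of guarded folds is a fold over filter-then-flatMap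
theorem pvFoldl_if_fold_flatMap {α β γ : Type} (l : List α) (p : α → Bool) (K : α → List β)
    (f : γ → β → γ) (z : γ) :
    l.foldl (fun acc x => if p x then (K x).foldl f acc else acc) z
      = ((l.filter p).flatMap K).foldl f z := by
  induction l generalizing z with
  | nil => rfl
  | cons a t ih =>
    by_cases h : p a <;> simp [h, List.flatMap_cons, List.foldl_append, ih]

-- the rule table lookup equals the arithmetic exactly-one test on bit arguments
theorem pvPoss_getD_bits {a b c d : Int}
    (ha : a = 0 ∨ a = 1) (hb : b = 0 ∨ b = 1) (hc : c = 0 ∨ c = 1) (hd : d = 0 ∨ d = 1) :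
    pvPoss.getD ((a, b), (c, d)) 0 = pvOne a b c d := by
  rcases ha with rfl | rfl <;> rcases hb with rfl | rfl <;>
    rcases hc with rfl | rfl <;> rcases hd with rfl | rfl <;> decide

theorem pvPoss_getD_pair {p q : Int × Int}
    (hp1 : p.1 = 0 ∨ p.1 = 1) (hp2 : p.2 = 0 ∨ p.2 = 1)
    (hq1 : q.1 = 0 ∨ q.1 = 1) (hq2 : q.2 = 0 ∨ q.2 = 1) :
    pvPoss.getD (p, q) 0 = pvOne p.1 p.2 q.1 q.2 := by
  obtain ⟨a, b⟩ := p
  obtain ⟨c, d⟩ := q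
  exact pvPoss_getD_bits hp1 hp2 hq1 hq2

-- last element of a list of known length, as a pyGetD
theorem pvPyGetD_last {α : Type} {l : List α} {t : Nat} {d : α} (h : l.length = t + 1) :
    PySem.List.pyGetD l (t : Int) d = l.getLastD d := by
  simp [PySem.List.pyGetD_natCast, List.getD, List.getLastD_eq_getLast?,
    List.getLast?_eq_getElem?, h]

theorem pvMap_eq_flatMap {α β : Type} (f : α → β) (l : List α) :
    l.map f = l.flatMap (fun x => [f x]) := by
  induction l with
  | nil => rfl
  | cons a t ih => simp [ih]

-- proof-side enumerator of B's first-stage DFS (the c2 keys, in generation order)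
def pvKeys1 (x y : Int) (col : List Int) (ys : List Int) : List (List Int) :=
  match col with
  | [] => [ys]
  | c :: rest =>
    (pvCombinations.filter (fun pq => pvOne x y pq.1 pq.2 == c)).flatMap
      (fun pq => pvKeys1 pq.1 pq.2 rest (ys ++ [pq.2]))

-- proof-side enumerator of B's later-stage DFS
def pvKeys2 (c1s : List Int) (y : Int) (col : List Int) (ys : List Int) : List (List Int) :=
  match col with
  | [] => [ys]
  | c :: rest =>
    (pvZeroOne.filter (fun q =>
        pvOne (PySem.List.pyGetD c1s 0 0) (PySem.List.pyGetD c1s 1 0) y q == c)).flatMap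
      (fun q => pvKeys2 c1s.tail q rest (ys ++ [q]))

theorem pvGo1_eq (col : List Int) : ∀ (x y : Int) (ys : List Int)
    (cnt : PySem.Dict (List Int) Int),
    pvGo1 x y col ys cnt
      = (pvKeys1 x y col ys).foldl (fun d k => d.insert k (d.getD k 0 + 1)) cnt := by
  induction col with
  | nil => intro x y ys cnt; simp [pvGo1, pvKeys1]
  | cons c rest ih =>
    intro x y ys cnt
    rw [pvGo1]
    rw [PySem.List.foldl_congr_mem _ _
      (fun (counts : PySem.Dict (List Int) Int) (pq : Int × Int) =>
        if pvOne x y pq.1 pq.2 == c then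
          (pvKeys1 pq.1 pq.2 rest (ys ++ [pq.2])).foldl
            (fun d k => d.insert k (d.getD k 0 + 1)) counts
        else counts) _
      (by intro acc pq _; by_cases h : pvOne x y pq.1 pq.2 == c <;> simp [h, ih])]
    rw [pvFoldl_if_fold_flatMap]
    rfl

theorem pvGo2_eq (col : List Int) : ∀ (c1s : List Int) (y : Int) (ys : List Int) (v : Int)
    (new : PySem.Dict (List Int) Int),
    pvGo2 c1s y col ys v new
      = (pvKeys2 c1s y col ys).foldl (fun d k => d.insert k (d.getD k 0 + v)) new := by
  induction col with
  | nil => intro c1s y ys v new; simp [pvGo2, pvKeys2]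
  | cons c rest ih =>
    intro c1s y ys v new
    rw [pvGo2]
    rw [PySem.List.foldl_congr_mem _ _
      (fun (new : PySem.Dict (List Int) Int) (q : Int) =>
        if pvOne (PySem.List.pyGetD c1s 0 0) (PySem.List.pyGetD c1s 1 0) y q == c then
          (pvKeys2 c1s.tail q rest (ys ++ [q])).foldl
            (fun d k => d.insert k (d.getD k 0 + v)) new
        else new) _
      (by
        intro acc q _
        by_cases h : pvOne (PySem.List.pyGetD c1s 0 0) (PySem.List.pyGetD c1s 1 0) y q == c <;>
          simp [h, ih, PySem.List.slice_from_one])]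
    rw [pvFoldl_if_fold_flatMap]
    rfl

-- shapes of the enumerated keys
theorem pvKeys1_shape (col : List Int) : ∀ (x y : Int) (ys k : List Int),
    k ∈ pvKeys1 x y col ys →
    ∃ tl, k = ys ++ tl ∧ tl.length = col.length ∧ ∀ b ∈ tl, b = 0 ∨ b = 1 := by
  induction col with
  | nil =>
    intro x y ys k hk
    simp [pvKeys1] at hk
    exact ⟨[], by simp [hk]⟩
  | cons c rest ih =>
    intro x y ys k hk
    simp only [pvKeys1, List.mem_flatMap, List.mem_filter] at hk
    obtain ⟨pq, ⟨hpq, -⟩, hk⟩ := hk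
    obtain ⟨tl, rfl, hlen, hbits⟩ := ih pq.1 pq.2 (ys ++ [pq.2]) k hk
    have hq : pq.2 = 0 ∨ pq.2 = 1 := by
      simp [pvCombinations] at hpq
      rcases hpq with h | h | h | h <;> simp [h]
    refine ⟨pq.2 :: tl, by simp, by simp [hlen], ?_⟩
    intro b hb
    rcases List.mem_cons.mp hb with rfl | hb
    · exact hq
    · exact hbits b hb
  

theorem pvKeys2_shape (col : List Int) : ∀ (c1s : List Int) (y : Int) (ys k : List Int),
    k ∈ pvKeys2 c1s y col ys →
    ∃ tl, k = ys ++ tl ∧ tl.length = col.length ∧ ∀ b ∈ tl, b = 0 ∨ b = 1 := by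
  induction col with
  | nil =>
    intro c1s y ys k hk
    simp [pvKeys2] at hk
    exact ⟨[], by simp [hk]⟩
  | cons c rest ih =>
    intro c1s y ys k hk
    simp only [pvKeys2, List.mem_flatMap, List.mem_filter] at hk
    obtain ⟨q, ⟨hq, -⟩, hk⟩ := hk
    obtain ⟨tl, rfl, hlen, hbits⟩ := ih c1s.tail q (ys ++ [q]) k hk
    have hqb : q = 0 ∨ q = 1 := by
      simp [pvZeroOne] at hq
      rcases hq with h | h <;> simp [h]
    refine ⟨q :: tl, by simp, by simp [hlen], ?_⟩
    intro b hb
    rcases List.mem_cons.mp hb with rfl | hb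
    · exact hqb
    · exact hbits b hb
  

-- A's breadth-first level loop (first stage, states are (c1,c2) cell pairs) projected to
-- the c2 components enumerates exactly B's DFS keys, in the same order
theorem pvChain1 (colrest : List Int) : ∀ (t : Nat) (row : List Int)
    (P : List (List (Int × Int))),
    row.drop t = colrest →
    (∀ s ∈ P, s.length = t + 1 ∧ ∀ p ∈ s, (p.1 = 0 ∨ p.1 = 1) ∧ (p.2 = 0 ∨ p.2 = 1)) →
    ((PySem.List.pyRange (t : Int) (PySem.List.len row) 1).foldl (fun prev i =>
        prev.foldl (fun next state =>
          pvCombinations.foldl (fun next comb =>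
            if pvPoss.getD (PySem.List.pyGetD state i (0, 0), comb) 0
                 == PySem.List.pyGetD row i 0
            then next ++ [state ++ [comb]] else next) next) []) P).map (List.map Prod.snd)
      = P.flatMap (fun s =>
          pvKeys1 (s.getLastD (0, 0)).1 (s.getLastD (0, 0)).2 colrest (s.map Prod.snd)) := by
  induction colrest with
  | nil =>
    intro t row P hdrop _
    have hle : (PySem.List.len row) ≤ (t : Int) := by
      simp only [PySem.List.len_eq]
      exact_mod_cast List.drop_eq_nil_iff.mp hdrop
    rw [PySem.List.pyRange_one_eq_nil hle]
    simp only [List.foldl_nil, pvKeys1]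
    exact pvMap_eq_flatMap _ _
  | cons c cr ih =>
    intro t row P hdrop hP
    have hlt : t < row.length := by
      by_contra h
      rw [List.drop_eq_nil_iff.mpr (by omega)] at hdrop
      exact List.cons_ne_nil c cr hdrop.symm
    have hrowt : row.getD t 0 = c := by
      have h := congrArg (fun (l : List Int) => l[0]?) hdrop
      simp only [List.getElem?_drop, Nat.add_zero] at h
      simp [List.getD_eq_getElem?_getD, h]
    rw [PySem.List.pyRange_one_cons (a := (t : Int)) (b := PySem.List.len row) (by
      rw [PySem.List.len_eq]; exact_mod_cast hlt)]
    rw [List.foldl_cons]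
    have hE : P.foldl (fun next state =>
        pvCombinations.foldl (fun next comb =>
          if pvPoss.getD (PySem.List.pyGetD state ((t : Int)) (0, 0), comb) 0
               == PySem.List.pyGetD row ((t : Int)) 0
          then next ++ [state ++ [comb]] else next) next) []
        = P.flatMap (fun s => ((pvCombinations.filter (fun pq =>
            pvPoss.getD (PySem.List.pyGetD s ((t : Int)) (0, 0), pq) 0
              == PySem.List.pyGetD row ((t : Int)) 0)).map (fun pq => s ++ [pq]))) := by
      rw [PySem.List.foldl_congr_mem _ _
        (fun next state => next ++ ((pvCombinations.filter (fun pq =>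
            pvPoss.getD (PySem.List.pyGetD state ((t : Int)) (0, 0), pq) 0
              == PySem.List.pyGetD row ((t : Int)) 0)).map (fun pq => state ++ [pq]))) _
        (by
          intro next s _
          rw [PySem.List.foldl_append_if])]
      rw [PySem.List.foldl_append_eq_flatMap]
      simp
    rw [hE]
    have hcast : (t : Int) + 1 = ((t + 1 : Nat) : Int) := by push_cast; ring
    rw [hcast]
    rw [ih (t + 1) row _ (by rw [← List.tail_drop, hdrop]; rfl) (by
      intro s' hs'
      simp only [List.mem_flatMap, List.mem_map, List.mem_filter] at hs'
      obtain ⟨s, hs, pq, ⟨hpq, -⟩, rfl⟩ := hs'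
      obtain ⟨hslen, hsbits⟩ := hP s hs
      refine ⟨by simp [hslen], ?_⟩
      intro p hp
      rcases List.mem_append.mp hp with hp | hp
      · exact hsbits p hp
      · have : p = pq := by simpa using hp
        subst this
        simp [pvCombinations] at hpq
        rcases hpq with h | h | h | h <;> simp [h])]
    rw [List.flatMap_assoc]
    apply List.flatMap_congr
    intro s hs
    obtain ⟨hslen, hsbits⟩ := hP s hs
    rw [List.flatMap_map]
    show _ = pvKeys1 (s.getLastD (0, 0)).1 (s.getLastD (0, 0)).2 (c :: cr) (s.map Prod.snd)
    rw [pvKeys1]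
    have hlast_mem : s.getLastD (0, 0) ∈ s := by
      rw [List.getLastD_eq_getLast?, List.getLast?_eq_getElem?]
      have : s.length - 1 < s.length := by omega
      simp only [List.getElem?_eq_getElem this]
      exact List.getElem_mem _
    have hrow' : PySem.List.pyGetD row ((t : Int)) 0 = c := by
      rw [PySem.List.pyGetD_natCast]; exact hrowt
    have hfilter : (pvCombinations.filter (fun pq =>
        pvPoss.getD (PySem.List.pyGetD s ((t : Int)) (0, 0), pq) 0
          == PySem.List.pyGetD row ((t : Int)) 0))
        = pvCombinations.filter (fun pq =>
            pvOne (s.getLastD (0, 0)).1 (s.getLastD (0, 0)).2 pq.1 pq.2 == c) := by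
      apply List.filter_congr
      intro pq hpq
      have hpqb : (pq.1 = 0 ∨ pq.1 = 1) ∧ (pq.2 = 0 ∨ pq.2 = 1) := by
        simp [pvCombinations] at hpq
        rcases hpq with h | h | h | h <;> simp [h]
      rw [pvPyGetD_last hslen, hrow']
      rw [pvPoss_getD_pair (hsbits _ hlast_mem).1 (hsbits _ hlast_mem).2 hpqb.1 hpqb.2]
    rw [hfilter]
    apply List.flatMap_congr
    intro pq _
    simp

-- same for the later stages (states are bare c2 bit lists, c1 is fixed)
theorem pvChain2 (colrest : List Int) : ∀ (t : Nat) (key row : List Int)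
    (P : List (List Int)),
    row.drop t = colrest →
    key.length = row.length + 1 →
    (∀ b ∈ key, b = 0 ∨ b = 1) →
    (∀ s ∈ P, s.length = t + 1 ∧ ∀ b ∈ s, b = 0 ∨ b = 1) →
    (PySem.List.pyRange (t : Int) (PySem.List.len row) 1).foldl (fun prev i =>
        prev.foldl (fun next state =>
          (PySem.List.pyRange 0 2 1).foldl (fun next j =>
            if pvPoss.getD ((PySem.List.pyGetD key i 0, PySem.List.pyGetD key (i + 1) 0),
                            (PySem.List.pyGetD state i 0, j)) 0 == PySem.List.pyGetD row i 0
            then next ++ [state ++ [j]] else next) next) []) P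
      = P.flatMap (fun s => pvKeys2 (key.drop t) (s.getLastD 0) colrest s) := by
  induction colrest with
  | nil =>
    intro t key row P hdrop _ _ _
    have hle : (PySem.List.len row) ≤ (t : Int) := by
      simp only [PySem.List.len_eq]
      exact_mod_cast List.drop_eq_nil_iff.mp hdrop
    rw [PySem.List.pyRange_one_eq_nil hle]
    simp [pvKeys2]
  | cons c cr ih =>
    intro t key row P hdrop hkey hkb hP
    have hlt : t < row.length := by
      by_contra h
      rw [List.drop_eq_nil_iff.mpr (by omega)] at hdrop
      exact List.cons_ne_nil c cr hdrop.symm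
    have hrowt : row.getD t 0 = c := by
      have h := congrArg (fun (l : List Int) => l[0]?) hdrop
      simp only [List.getElem?_drop, Nat.add_zero] at h
      simp [List.getD_eq_getElem?_getD, h]
    have h01 : PySem.List.pyRange 0 2 1 = ([0, 1] : List Int) := by decide
    rw [PySem.List.pyRange_one_cons (a := (t : Int)) (b := PySem.List.len row) (by
      rw [PySem.List.len_eq]; exact_mod_cast hlt)]
    rw [List.foldl_cons]
    -- the single level at index t, as a flatMap
    have hE : P.foldl (fun next state =>
        (PySem.List.pyRange 0 2 1).foldl (fun next j =>
          if pvPoss.getD ((PySem.List.pyGetD key ((t : Int)) 0,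
                           PySem.List.pyGetD key ((t : Int) + 1) 0),
                          (PySem.List.pyGetD state ((t : Int)) 0, j)) 0
               == PySem.List.pyGetD row ((t : Int)) 0
          then next ++ [state ++ [j]] else next) next) []
        = P.flatMap (fun s => ((([0, 1] : List Int).filter (fun j =>
            pvPoss.getD ((PySem.List.pyGetD key ((t : Int)) 0,
                          PySem.List.pyGetD key ((t : Int) + 1) 0),
                         (PySem.List.pyGetD s ((t : Int)) 0, j)) 0
              == PySem.List.pyGetD row ((t : Int)) 0)).map (fun j => s ++ [j]))) := by
      rw [PySem.List.foldl_congr_mem _ _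
        (fun next state => next ++ ((([0, 1] : List Int).filter (fun j =>
            pvPoss.getD ((PySem.List.pyGetD key ((t : Int)) 0,
                          PySem.List.pyGetD key ((t : Int) + 1) 0),
                         (PySem.List.pyGetD state ((t : Int)) 0, j)) 0
              == PySem.List.pyGetD row ((t : Int)) 0)).map (fun j => state ++ [j]))) _
        (by
          intro next s _
          rw [h01, PySem.List.foldl_append_if])]
      rw [PySem.List.foldl_append_eq_flatMap]
      simp
    rw [hE]
    have hcast : (t : Int) + 1 = ((t + 1 : Nat) : Int) := by push_cast; ring
    rw [hcast]
    rw [ih (t + 1) key row _ (by rw [← List.tail_drop, hdrop]; rfl) hkey hkb (by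
      intro s' hs'
      simp only [List.mem_flatMap, List.mem_map, List.mem_filter] at hs'
      obtain ⟨s, hs, j, ⟨hj01, -⟩, rfl⟩ := hs'
      obtain ⟨hslen, hsbits⟩ := hP s hs
      refine ⟨by simp [hslen], ?_⟩
      intro b hb
      rcases List.mem_append.mp hb with hb | hb
      · exact hsbits b hb
      · have : b = j := by simpa using hb
        subst this
        simpa using hj01)]
    rw [List.flatMap_assoc]
    apply List.flatMap_congr
    intro s hs
    obtain ⟨hslen, hsbits⟩ := hP s hs
    rw [List.flatMap_map]
    -- unfold one step of pvKeys2 on the right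
    show _ = pvKeys2 (key.drop t) (s.getLastD 0) (c :: cr) s
    rw [pvKeys2]
    have hsne : s ≠ [] := by intro h; rw [h] at hslen; simp at hslen
    have hlast_mem : s.getLastD 0 ∈ s := by
      rw [← pvPyGetD_last hslen, PySem.List.pyGetD_natCast, List.getD_eq_getElem _ _ (by omega)]
      exact List.getElem_mem _
    have hkt : PySem.List.pyGetD key ((t : Int)) 0 = PySem.List.pyGetD (key.drop t) 0 0 := by
      simp only [PySem.List.pyGetD_natCast, show ((0 : Int) = ((0 : Nat) : Int)) from rfl]
      rw [List.getD_eq_getElem?_getD, List.getD_eq_getElem?_getD, List.getElem?_drop]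
      simp
    have hkt1 : PySem.List.pyGetD key (((t + 1 : Nat) : Int)) 0
        = PySem.List.pyGetD (key.drop t) 1 0 := by
      simp only [PySem.List.pyGetD_natCast, show ((1 : Int) = ((1 : Nat) : Int)) from rfl]
      rw [List.getD_eq_getElem?_getD, List.getD_eq_getElem?_getD, List.getElem?_drop]
    have hfilter : (([0, 1] : List Int).filter (fun j =>
        pvPoss.getD ((PySem.List.pyGetD key ((t : Int)) 0,
                      PySem.List.pyGetD key (((t + 1 : Nat) : Int)) 0),
                     (PySem.List.pyGetD s ((t : Int)) 0, j)) 0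
          == PySem.List.pyGetD row ((t : Int)) 0))
        = pvZeroOne.filter (fun q =>
            pvOne (PySem.List.pyGetD (key.drop t) 0 0) (PySem.List.pyGetD (key.drop t) 1 0)
              (s.getLastD 0) q == c) := by
      apply List.filter_congr
      intro j hj
      have hj01 : j = 0 ∨ j = 1 := by
        rcases List.mem_cons.mp hj with h | h
        · exact Or.inl h
        · right; simpa using h
      have ha : PySem.List.pyGetD key ((t : Int)) 0 = 0 ∨
          PySem.List.pyGetD key ((t : Int)) 0 = 1 := by
        rw [PySem.List.pyGetD_natCast, List.getD_eq_getElem _ _ (by omega)]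
        exact hkb _ (List.getElem_mem _)
      have hb : PySem.List.pyGetD key (((t + 1 : Nat) : Int)) 0 = 0 ∨
          PySem.List.pyGetD key (((t + 1 : Nat) : Int)) 0 = 1 := by
        rw [PySem.List.pyGetD_natCast, List.getD_eq_getElem _ _ (by omega)]
        exact hkb _ (List.getElem_mem _)
      have hrow' : PySem.List.pyGetD row ((t : Int)) 0 = c := by
        rw [PySem.List.pyGetD_natCast]; exact hrowt
      rw [pvPyGetD_last hslen, hrow']
      rw [pvPoss_getD_bits ha hb (hsbits _ hlast_mem) hj01]
      rw [hkt1, hkt]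
    rw [hfilter]
    apply List.flatMap_congr
    intro q _
    rw [List.tail_drop]
    rw [List.getLastD_concat]

-- A's per-key state enumeration in pvBuildGrid2, as a standalone function
def pvStatesA (key col : List Int) : List (List Int) :=
  let prev0 : List (List Int) :=
    pvCombinations.foldl (fun acc comb =>
      if pvPoss.getD ((PySem.List.pyGetD key 0 0, PySem.List.pyGetD key 1 0), comb) 0
           == PySem.List.pyGetD col 0 0
      then acc ++ [[comb.1, comb.2]] else acc) []
  (PySem.List.pyRange 1 (PySem.List.len col) 1).foldl (fun prev i =>
    prev.foldl (fun next state =>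
      (PySem.List.pyRange 0 2 1).foldl (fun next j =>
        if pvPoss.getD ((PySem.List.pyGetD key i 0, PySem.List.pyGetD key (i + 1) 0),
                        (PySem.List.pyGetD state i 0, j)) 0 == PySem.List.pyGetD col i 0
        then next ++ [state ++ [j]] else next) next) []) prev0

theorem pvBuildGrid2_flatMap (fs : PySem.Dict (List Int) Int) (col : List Int) :
    pvBuildGrid2 fs col
      = fs.keys.flatMap (fun key => (pvStatesA key col).map (fun st => (key, st))) := by
  unfold pvBuildGrid2 pvStatesA
  rw [PySem.List.foldl_congr_mem _ _
    (fun (grid2 : List (List Int × List Int)) (key : List Int) =>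
      grid2 ++ (pvStatesA key col).map (fun st => (key, st))) _
    (by
      intro acc key _
      simp only [pvStatesA]
      rw [PySem.List.foldl_append_singleton_eq_map])]
  rw [PySem.List.foldl_append_eq_flatMap]
  simp [pvStatesA]

-- A's per-key states equal B's DFS key enumeration
theorem pvStatesA_eq (key : List Int) (c : Int) (rest : List Int)
    (hklen : key.length = rest.length + 2) (hkb : ∀ b ∈ key, b = 0 ∨ b = 1) :
    pvStatesA key (c :: rest)
      = (pvCombinations.filter (fun pq =>
          pvOne (PySem.List.pyGetD key 0 0) (PySem.List.pyGetD key 1 0) pq.1 pq.2 == c)).flatMap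
          (fun pq => pvKeys2 key.tail pq.2 rest [pq.1, pq.2]) := by
  have hch := pvChain2 rest 1 key (c :: rest)
    ((pvCombinations.filter (fun comb =>
        pvPoss.getD ((PySem.List.pyGetD key 0 0, PySem.List.pyGetD key 1 0), comb) 0
          == PySem.List.pyGetD (c :: rest) 0 0)).map (fun comb => [comb.1, comb.2]))
    (by simp)
    (by simp; omega)
    hkb
    (by
      intro s hs
      simp only [List.mem_map, List.mem_filter] at hs
      obtain ⟨pq, ⟨hpq, -⟩, rfl⟩ := hs
      refine ⟨by simp, ?_⟩
      intro b hb
      simp [pvCombinations] at hpq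
      rcases hpq with h | h | h | h <;>
        rcases List.mem_cons.mp hb with rfl | hb <;> simp_all)
  rw [Nat.cast_one] at hch
  simp only [pvStatesA]
  rw [PySem.List.foldl_append_if, List.nil_append, hch]
  rw [List.flatMap_map]
  have hkd : key.drop 1 = key.tail := List.drop_one
  have hfilter : ∀ (pq : Int × Int), pq ∈ pvCombinations →
      (pvPoss.getD ((PySem.List.pyGetD key 0 0, PySem.List.pyGetD key 1 0), pq) 0
         == PySem.List.pyGetD (c :: rest) 0 0)
        = (pvOne (PySem.List.pyGetD key 0 0) (PySem.List.pyGetD key 1 0) pq.1 pq.2 == c) := by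
    intro pq hpq
    have hpqb : (pq.1 = 0 ∨ pq.1 = 1) ∧ (pq.2 = 0 ∨ pq.2 = 1) := by
      simp [pvCombinations] at hpq
      rcases hpq with h | h | h | h <;> simp [h]
    have hk0 : PySem.List.pyGetD key 0 0 = 0 ∨ PySem.List.pyGetD key 0 0 = 1 := by
      rw [PySem.List.pyGetD_ofNat' key 0 0, List.getD_eq_getElem _ _ (by omega)]
      exact hkb _ (List.getElem_mem _)
    have hk1 : PySem.List.pyGetD key 1 0 = 0 ∨ PySem.List.pyGetD key 1 0 = 1 := by
      rw [PySem.List.pyGetD_ofNat' key 1 0, List.getD_eq_getElem _ _ (by omega)]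
      exact hkb _ (List.getElem_mem _)
    rw [pvPoss_getD_pair hk0 hk1 hpqb.1 hpqb.2]
    rw [PySem.List.pyGetD_zero_cons]
  rw [List.filter_congr hfilter]
  apply List.flatMap_congr
  intro pq _
  rw [hkd]
  simp

-- first stage: A's grid1 aggregation equals B's DFS counter
theorem pvStage1_eq (col : List Int) (hcol : col ≠ []) :
    (pvBuildGrid1 col).foldl (fun fs r =>
        if fs.contains r.2 then fs.insert r.2 (fs.getD r.2 0 + 1) else fs.insert r.2 1)
      PySem.Dict.empty
      = pvCombinations.foldl (fun cnt xy => pvGo1 xy.1 xy.2 col [xy.2] cnt)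
          PySem.Dict.empty := by
  obtain ⟨c, rest, rfl⟩ := List.exists_cons_of_ne_nil hcol
  have hitems : pvPoss.items =
      [(((0,0),(0,0)),0), (((0,0),(0,1)),1), (((0,0),(1,0)),1), (((0,0),(1,1)),0),
       (((0,1),(0,0)),1), (((0,1),(0,1)),0), (((0,1),(1,0)),0), (((0,1),(1,1)),0),
       (((1,0),(0,0)),1), (((1,0),(0,1)),0), (((1,0),(1,0)),0), (((1,0),(1,1)),0),
       (((1,1),(0,0)),0), (((1,1),(0,1)),0), (((1,1),(1,0)),0), (((1,1),(1,1)),0)] := by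
    decide
  -- A's side: normalize to a fold of inserts over the enumerated key list
  simp only [pvBuildGrid1]
  rw [List.foldl_map]
  rw [PySem.List.foldl_congr_mem _ _
    (fun (fs : PySem.Dict (List Int) Int) (st : List (Int × Int)) =>
      fs.insert (st.map Prod.snd) (fs.getD (st.map Prod.snd) 0 + 1)) _
    (by
      intro fs st _
      dsimp only
      exact pvInc_norm)]
  rw [← List.foldl_map (f := List.map Prod.snd)
    (g := fun (fs : PySem.Dict (List Int) Int) (k : List Int) =>
      fs.insert k (fs.getD k 0 + 1))]
  rw [PySem.List.foldl_append_if]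
  have hch := pvChain1 rest 1 (c :: rest)
    ((pvPoss.items.filter (fun kv =>
        PySem.List.pyGetD (c :: rest) 0 0 == kv.2)).map (fun kv => [kv.1.1, kv.1.2]))
    (by simp)
    (by
      intro s hs
      simp only [List.mem_map, List.mem_filter] at hs
      obtain ⟨kv, ⟨hkv, -⟩, rfl⟩ := hs
      refine ⟨by simp, ?_⟩
      have hball : ∀ kv ∈ pvPoss.items,
          (kv.1.1.1 = 0 ∨ kv.1.1.1 = 1) ∧ (kv.1.1.2 = 0 ∨ kv.1.1.2 = 1) ∧
          (kv.1.2.1 = 0 ∨ kv.1.2.1 = 1) ∧ (kv.1.2.2 = 0 ∨ kv.1.2.2 = 1) := by decide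
      have hb := hball kv hkv
      intro p hp
      rcases List.mem_cons.mp hp with rfl | hp
      · exact ⟨hb.1, hb.2.1⟩
      · have : p = kv.1.2 := by simpa using hp
        subst this
        exact ⟨hb.2.2.1, hb.2.2.2⟩)
  rw [Nat.cast_one] at hch
  rw [List.nil_append, hch]
  rw [List.flatMap_map]
  -- B's side: bridge the DFS to the enumerated keys
  rw [PySem.List.foldl_congr_mem _ _
    (fun (cnt : PySem.Dict (List Int) Int) (xy : Int × Int) =>
      (pvKeys1 xy.1 xy.2 (c :: rest) [xy.2]).foldl
        (fun d k => d.insert k (d.getD k 0 + 1)) cnt) _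
    (by intro cnt xy _; dsimp only; rw [pvGo1_eq])]
  rw [pvFoldl_fold_flatMap]
  -- remaining: the two enumerated key lists coincide
  congr 1
  rw [PySem.List.pyGetD_zero_cons]
  by_cases hc0 : c = 0
  · subst hc0
    simp [hitems, pvCombinations, pvKeys1, pvOne]
  by_cases hc1 : c = 1
  · subst hc1
    simp [hitems, pvCombinations, pvKeys1, pvOne]
  · have h0 : (c == (0 : Int)) = false := by simp [hc0]
    have h1 : (c == (1 : Int)) = false := by simp [hc1]
    have h0' : ((0 : Int) == c) = false := by simp [Ne.symm hc0]
    have h1' : ((1 : Int) == c) = false := by simp [Ne.symm hc1]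
    simp [hitems, pvCombinations, pvKeys1, pvOne, h0, h1, h0', h1']

-- later stages: A's grid2 aggregation equals B's items-driven DFS counter
theorem pvStage2_eq (fs : PySem.Dict (List Int) Int) (col : List Int) (hcol : col ≠ [])
    (hnd : fs.keys.Nodup)
    (hk : ∀ k ∈ fs.keys, (∀ b ∈ k, b = 0 ∨ b = 1) ∧ k.length = col.length + 1) :
    (pvBuildGrid2 fs col).foldl (fun ss r =>
        if fs.contains r.1 then
          (if ss.contains r.2 then ss.insert r.2 (ss.getD r.2 0 + fs.getD r.1 0)
           else ss.insert r.2 (fs.getD r.1 0))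
        else ss) PySem.Dict.empty
      = fs.items.foldl (fun new kv =>
          pvCombinations.foldl (fun new y01 =>
            if pvOne (PySem.List.pyGetD kv.1 0 0) (PySem.List.pyGetD kv.1 1 0) y01.1 y01.2
                 == PySem.List.pyGetD col 0 0
            then pvGo2 (PySem.List.slice kv.1 (some 1) none) y01.2
                   (PySem.List.slice col (some 1) none) [y01.1, y01.2] kv.2 new
            else new) new) PySem.Dict.empty := by
  obtain ⟨c, rest, rfl⟩ := List.exists_cons_of_ne_nil hcol
  rw [pvBuildGrid2_flatMap]
  rw [← pvFoldl_fold_flatMap]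
  rw [PySem.Dict.items_eq_map_keys fs hnd 0]
  rw [List.foldl_map]
  apply PySem.List.foldl_congr_mem
  intro acc key hkey
  dsimp only
  obtain ⟨hkb, hklen⟩ := hk key hkey
  have hcont : fs.contains key = true := (PySem.Dict.contains_iff_mem_keys fs key).mpr hkey
  rw [List.foldl_map]
  rw [pvStatesA_eq key c rest (by simp at hklen; omega) hkb]
  rw [PySem.List.foldl_congr_mem _ _
    (fun (ss : PySem.Dict (List Int) Int) (st : List Int) =>
      ss.insert st (ss.getD st 0 + fs.getD key 0)) _
    (by
      intro ss st _
      dsimp only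
      rw [hcont]
      simp only [if_true]
      exact pvInc_norm)]
  rw [PySem.List.foldl_congr_mem _ _
    (fun (new : PySem.Dict (List Int) Int) (y01 : Int × Int) =>
      if pvOne (PySem.List.pyGetD key 0 0) (PySem.List.pyGetD key 1 0) y01.1 y01.2 == c then
        (pvKeys2 key.tail y01.2 rest [y01.1, y01.2]).foldl
          (fun d k => d.insert k (d.getD k 0 + fs.getD key 0)) new
      else new) _
    (by
      intro new pq _
      rw [PySem.List.pyGetD_zero_cons]
      by_cases h : (pvOne (PySem.List.pyGetD key 0 0) (PySem.List.pyGetD key 1 0) pq.1 pq.2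
          == c) = true
      · simp only [h, if_true]
        rw [PySem.List.slice_from_one, PySem.List.slice_from_one, List.tail_cons, pvGo2_eq]
      · simp only [h]
        simp)]
  rw [pvFoldl_if_fold_flatMap]

-- a fold of counter inserts preserves unique keys and any key property
theorem pvInvFoldIns (L : List (List Int)) (v : PySem.Dict (List Int) Int → List Int → Int)
    (P : List Int → Prop) (hL : ∀ k ∈ L, P k) :
    ∀ (d : PySem.Dict (List Int) Int), d.keys.Nodup → (∀ k ∈ d.keys, P k) →
    (L.foldl (fun d k => d.insert k (v d k)) d).keys.Nodup ∧
      ∀ k ∈ (L.foldl (fun d k => d.insert k (v d k)) d).keys, P k := by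
  intro d hnd hdk
  refine ⟨PySem.Dict.nodup_keys_foldl_insert L v d hnd, ?_⟩
  intro k hk
  rw [PySem.Dict.keys_foldl_insert] at hk
  rcases (PySem.Set.mem_update _ _ _).mp hk with h | h
  · exact hdk k h
  · exact hL k h

-- the stage invariant: unique keys, bit entries, length n+1
def pvInv (d : PySem.Dict (List Int) Int) (n : Nat) : Prop :=
  d.keys.Nodup ∧ ∀ k ∈ d.keys, (∀ b ∈ k, b = 0 ∨ b = 1) ∧ k.length = n + 1

theorem pvInv_stage1 (col : List Int) :
    pvInv (pvCombinations.foldl (fun cnt xy => pvGo1 xy.1 xy.2 col [xy.2] cnt)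
      PySem.Dict.empty) col.length := by
  rw [PySem.List.foldl_congr_mem _ _
    (fun (cnt : PySem.Dict (List Int) Int) (xy : Int × Int) =>
      (pvKeys1 xy.1 xy.2 col [xy.2]).foldl
        (fun d k => d.insert k (d.getD k 0 + 1)) cnt) _
    (by intro cnt xy _; dsimp only; rw [pvGo1_eq])]
  rw [pvFoldl_fold_flatMap]
  unfold pvInv
  apply pvInvFoldIns _ _ _ ?_ _ (by simp) (by simp)
  intro k hk
  simp only [List.mem_flatMap] at hk
  obtain ⟨xy, hxy, hk⟩ := hk
  obtain ⟨tl, rfl, hlen, hbits⟩ := pvKeys1_shape col xy.1 xy.2 [xy.2] k hk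
  have hxyb : xy.2 = 0 ∨ xy.2 = 1 := by
    simp [pvCombinations] at hxy
    rcases hxy with h | h | h | h <;> simp [h]
  refine ⟨?_, by simp [hlen]⟩
  intro b hb
  rcases List.mem_append.mp hb with hb | hb
  · have : b = xy.2 := by simpa using hb
    subst this; exact hxyb
  · exact hbits b hb

theorem pvInv_stage2 (d : PySem.Dict (List Int) Int) (col : List Int) (n : Nat)
    (hlen : col.length = n) (hcol : col ≠ []) :
    pvInv (d.items.foldl (fun new kv =>
        pvCombinations.foldl (fun new y01 =>
          if pvOne (PySem.List.pyGetD kv.1 0 0) (PySem.List.pyGetD kv.1 1 0) y01.1 y01.2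
               == PySem.List.pyGetD col 0 0
          then pvGo2 (PySem.List.slice kv.1 (some 1) none) y01.2
                 (PySem.List.slice col (some 1) none) [y01.1, y01.2] kv.2 new
          else new) new) PySem.Dict.empty) n := by
  obtain ⟨c, rest, rfl⟩ := List.exists_cons_of_ne_nil hcol
  -- inner invariant step, for one item of the outer fold
  have hinner : ∀ (cs : List (Int × Int)),
      (∀ y ∈ cs, (y.1 = 0 ∨ y.1 = 1) ∧ (y.2 = 0 ∨ y.2 = 1)) →
      ∀ (kv : List Int × Int) (e : PySem.Dict (List Int) Int),
      e.keys.Nodup → (∀ k ∈ e.keys, (∀ b ∈ k, b = 0 ∨ b = 1) ∧ k.length = n + 1) →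
      (cs.foldl (fun new y01 =>
          if pvOne (PySem.List.pyGetD kv.1 0 0) (PySem.List.pyGetD kv.1 1 0) y01.1 y01.2
               == PySem.List.pyGetD (c :: rest) 0 0
          then pvGo2 (PySem.List.slice kv.1 (some 1) none) y01.2
                 (PySem.List.slice (c :: rest) (some 1) none) [y01.1, y01.2] kv.2 new
          else new) e).keys.Nodup ∧
        ∀ k ∈ (cs.foldl (fun new y01 =>
          if pvOne (PySem.List.pyGetD kv.1 0 0) (PySem.List.pyGetD kv.1 1 0) y01.1 y01.2
               == PySem.List.pyGetD (c :: rest) 0 0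
          then pvGo2 (PySem.List.slice kv.1 (some 1) none) y01.2
                 (PySem.List.slice (c :: rest) (some 1) none) [y01.1, y01.2] kv.2 new
          else new) e).keys, (∀ b ∈ k, b = 0 ∨ b = 1) ∧ k.length = n + 1 := by
    intro cs
    induction cs with
    | nil => intro _ kv e hnd hdk; exact ⟨hnd, hdk⟩
    | cons y01 cs' ih =>
      intro hcs kv e hnd hdk
      rw [List.foldl_cons]
      by_cases h : (pvOne (PySem.List.pyGetD kv.1 0 0) (PySem.List.pyGetD kv.1 1 0)
          y01.1 y01.2 == PySem.List.pyGetD (c :: rest) 0 0) = true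
      · simp only [h, if_true]
        have he' : pvGo2 (PySem.List.slice kv.1 (some 1) none) y01.2
              (PySem.List.slice (c :: rest) (some 1) none) [y01.1, y01.2] kv.2 e
            = (pvKeys2 kv.1.tail y01.2 rest [y01.1, y01.2]).foldl
                (fun d k => d.insert k (d.getD k 0 + kv.2)) e := by
          rw [PySem.List.slice_from_one, PySem.List.slice_from_one, List.tail_cons, pvGo2_eq]
        rw [he']
        have hKp : ∀ k ∈ pvKeys2 kv.1.tail y01.2 rest [y01.1, y01.2],
            (∀ b ∈ k, b = 0 ∨ b = 1) ∧ k.length = n + 1 := by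
          intro k hk
          obtain ⟨tl, rfl, hlenk, hbits⟩ := pvKeys2_shape rest kv.1.tail y01.2
            [y01.1, y01.2] k hk
          have hy := hcs y01 List.mem_cons_self
          refine ⟨?_, by
            have hn := hlen
            simp only [List.length_cons] at hn
            simp [hlenk]
            omega⟩
          intro b hb
          rcases List.mem_append.mp hb with hb | hb
          · rcases List.mem_cons.mp hb with rfl | hb
            · exact hy.1
            · have : b = y01.2 := by simpa using hb
              subst this; exact hy.2
          · exact hbits b hb
        obtain ⟨h1, h2⟩ := pvInvFoldIns _ _ _ hKp e hnd hdk
        exact ih (fun y hy => hcs y (List.mem_cons_of_mem _ hy)) kv _ h1 h2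
      · simp only [h]
        exact ih (fun y hy => hcs y (List.mem_cons_of_mem _ hy)) kv e hnd hdk
  -- outer fold over the items
  have houter : ∀ (items : List (List Int × Int)) (e : PySem.Dict (List Int) Int),
      e.keys.Nodup → (∀ k ∈ e.keys, (∀ b ∈ k, b = 0 ∨ b = 1) ∧ k.length = n + 1) →
      (items.foldl (fun new kv =>
        pvCombinations.foldl (fun new y01 =>
          if pvOne (PySem.List.pyGetD kv.1 0 0) (PySem.List.pyGetD kv.1 1 0) y01.1 y01.2
               == PySem.List.pyGetD (c :: rest) 0 0
          then pvGo2 (PySem.List.slice kv.1 (some 1) none) y01.2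
                 (PySem.List.slice (c :: rest) (some 1) none) [y01.1, y01.2] kv.2 new
          else new) new) e).keys.Nodup ∧
        ∀ k ∈ (items.foldl (fun new kv =>
        pvCombinations.foldl (fun new y01 =>
          if pvOne (PySem.List.pyGetD kv.1 0 0) (PySem.List.pyGetD kv.1 1 0) y01.1 y01.2
               == PySem.List.pyGetD (c :: rest) 0 0
          then pvGo2 (PySem.List.slice kv.1 (some 1) none) y01.2
                 (PySem.List.slice (c :: rest) (some 1) none) [y01.1, y01.2] kv.2 new
          else new) new) e).keys, (∀ b ∈ k, b = 0 ∨ b = 1) ∧ k.length = n + 1 := by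
    intro items
    induction items with
    | nil => intro e hnd hdk; exact ⟨hnd, hdk⟩
    | cons kv items' ih =>
      intro e hnd hdk
      rw [List.foldl_cons]
      have hcsb : ∀ y ∈ pvCombinations, (y.1 = 0 ∨ y.1 = 1) ∧ (y.2 = 0 ∨ y.2 = 1) := by decide
      obtain ⟨h1, h2⟩ := hinner pvCombinations hcsb kv e hnd hdk
      exact ih _ h1 h2
  exact houter _ _ (by simp) (by simp)

-- transpose facts under the precondition
theorem pvTranspose_facts (g : List (List Int)) (hg : g ≠ []) (hr : ∀ r ∈ g, r ≠ []) :
    pvTranspose g ≠ [] ∧ ∀ c ∈ pvTranspose g, c.length = g.length ∧ c ≠ [] := by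
  obtain ⟨r0, grest, rfl⟩ := List.exists_cons_of_ne_nil hg
  have hmin : ∀ (L : List (List Int)) (a : Nat), (∀ r ∈ L, 1 ≤ r.length) → 1 ≤ a →
      1 ≤ L.foldl (fun acc r => min acc r.length) a := by
    intro L
    induction L with
    | nil => intro a _ ha; exact ha
    | cons r L ih =>
      intro a hL ha
      rw [List.foldl_cons]
      exact ih _ (fun r hr => hL r (List.mem_cons_of_mem _ hr))
        (le_min ha (hL r List.mem_cons_self))
  have h1 : 1 ≤ grest.foldl (fun acc r => min acc r.length) r0.length := by
    apply hmin
    · intro r hrr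
      exact List.length_pos_iff.mpr (hr r (List.mem_cons_of_mem _ hrr))
    · exact List.length_pos_iff.mpr (hr r0 List.mem_cons_self)
  constructor
  · simp only [pvTranspose]
    intro hcontra
    rw [List.map_eq_nil_iff, List.range_eq_nil] at hcontra
    omega
  · intro col hcol
    simp only [pvTranspose, List.mem_map] at hcol
    obtain ⟨t, -, rfl⟩ := hcol
    constructor
    · simp
    · simp

-- A's index loop over the transpose is a fold over its tail
theorem pvFoldl_pyRange_shift {β : Type} (xs : List (List Int)) :
    ∀ (pre : List (List Int)) (F : β → List Int → β) (z : β), pre ≠ [] →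
    (PySem.List.pyRange (pre.length : Int) (PySem.List.len (pre ++ xs)) 1).foldl
        (fun acc i => F acc (PySem.List.pyGetD (pre ++ xs) i [])) z
      = xs.foldl F z := by
  induction xs with
  | nil =>
    intro pre F z _
    rw [PySem.List.pyRange_one_eq_nil (by simp [PySem.List.len_eq])]
    rfl
  | cons x xs ih =>
    intro pre F z hpre
    rw [PySem.List.pyRange_one_cons (a := (pre.length : Int))
      (b := PySem.List.len (pre ++ x :: xs)) (by
        rw [PySem.List.len_eq]
        push_cast [List.length_append, List.length_cons]
        omega)]
    rw [List.foldl_cons]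
    have hhead : PySem.List.pyGetD (pre ++ x :: xs) ((pre.length : Int)) [] = x := by
      rw [PySem.List.pyGetD_natCast, List.getD_eq_getElem?_getD,
        List.getElem?_append_right (by omega)]
      simp
    rw [hhead]
    have hassoc : pre ++ x :: xs = (pre ++ [x]) ++ xs := by simp
    have hcast : (pre.length : Int) + 1 = ((pre ++ [x]).length : Int) := by
      simp
    rw [List.foldl_cons] at *
    rw [hcast]
    calc (PySem.List.pyRange ((pre ++ [x]).length : Int)
            (PySem.List.len (pre ++ x :: xs)) 1).foldl
          (fun acc i => F acc (PySem.List.pyGetD (pre ++ x :: xs) i [])) (F z x)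
        = (PySem.List.pyRange ((pre ++ [x]).length : Int)
            (PySem.List.len ((pre ++ [x]) ++ xs)) 1).foldl
          (fun acc i => F acc (PySem.List.pyGetD ((pre ++ [x]) ++ xs) i [])) (F z x) := by
          rw [← hassoc]
      _ = xs.foldl F (F z x) := ih (pre ++ [x]) F (F z x) (by simp)

-- the column loop preserves equality of the stage dicts
theorem pvLoop_eq (cols : List (List Int)) : ∀ (d : PySem.Dict (List Int) Int) (n : Nat),
    pvInv d n → (∀ c ∈ cols, c.length = n ∧ c ≠ []) →
    cols.foldl (fun fs col =>
        (pvBuildGrid2 fs col).foldl (fun ss r =>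
          if fs.contains r.1 then
            (if ss.contains r.2 then ss.insert r.2 (ss.getD r.2 0 + fs.getD r.1 0)
             else ss.insert r.2 (fs.getD r.1 0))
          else ss) PySem.Dict.empty) d
      = cols.foldl (fun counts col =>
          counts.items.foldl (fun new kv =>
            pvCombinations.foldl (fun new y01 =>
              if pvOne (PySem.List.pyGetD kv.1 0 0) (PySem.List.pyGetD kv.1 1 0) y01.1 y01.2
                   == PySem.List.pyGetD col 0 0
              then pvGo2 (PySem.List.slice kv.1 (some 1) none) y01.2
                     (PySem.List.slice col (some 1) none) [y01.1, y01.2] kv.2 new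
              else new) new) PySem.Dict.empty) d := by
  induction cols with
  | nil => intro d n _ _; rfl
  | cons col cols ih =>
    intro d n hinv hcols
    obtain ⟨hlen, hcol⟩ := hcols col List.mem_cons_self
    rw [List.foldl_cons, List.foldl_cons]
    rw [pvStage2_eq d col hcol hinv.1 (by
      intro k hk
      obtain ⟨hb, hl⟩ := hinv.2 k hk
      exact ⟨hb, by rw [hlen]; exact hl⟩)]
    exact ih _ n (pvInv_stage2 d col n hlen hcol)
      (fun c hc => hcols c (List.mem_cons_of_mem _ hc))

-- summing a counter's values, the two ways the programs do it
theorem pvSum_values (d : PySem.Dict (List Int) Int) :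
    d.items.foldl (fun acc kv => acc + kv.2) 0 = d.values.sum := by
  rw [PySem.List.foldl_add d.items (fun kv => kv.2) 0]
  simp only [PySem.Dict.values]
  omega

theorem answer_spec_aux : ∀ (g : List (List Int)), Pre_answer g → answer g = answer_alt g := by
  intro g hpre
  obtain ⟨hg, hr⟩ := hpre
  obtain ⟨hTne, hTc⟩ := pvTranspose_facts g hg hr
  obtain ⟨t0, ts, hT⟩ := List.exists_cons_of_ne_nil hTne
  have ht0 : t0.length = g.length ∧ t0 ≠ [] := hTc t0 (by rw [hT]; exact List.mem_cons_self)
  simp only [answer, answer_alt]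
  rw [hT, PySem.List.pyGetD_zero_cons]
  rw [pvStage1_eq t0 ht0.2]
  rw [PySem.List.slice_from_one, List.tail_cons]
  -- A's index loop over the transpose becomes a fold over ts
  have hshift := pvFoldl_pyRange_shift (β := PySem.Dict (List Int) Int) ts [t0]
    (fun fs col =>
      (pvBuildGrid2 fs col).foldl (fun ss r =>
        if fs.contains r.1 then
          (if ss.contains r.2 then ss.insert r.2 (ss.getD r.2 0 + fs.getD r.1 0)
           else ss.insert r.2 (fs.getD r.1 0))
        else ss) PySem.Dict.empty)
    (pvCombinations.foldl (fun cnt xy => pvGo1 xy.1 xy.2 t0 [xy.2] cnt) PySem.Dict.empty)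
    (by simp)
  simp only [List.length_cons, List.length_nil, Nat.zero_add, Nat.cast_one,
    List.singleton_append] at hshift
  rw [hshift]
  rw [pvLoop_eq ts _ t0.length (pvInv_stage1 t0) (by
    intro c hc
    obtain ⟨hcl, hcn⟩ := hTc c (by rw [hT]; exact List.mem_cons_of_mem _ hc)
    exact ⟨by rw [hcl, ht0.1], hcn⟩)]
  rw [pvSum_values]

-- ===== VERDICT (by name: the statement is the Claim_ definition above) =====
theorem answer_spec : Claim_equal_answer := by
  intro g _ hpre
  exact answer_spec_aux g hpre
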